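-- pv_equiv track=rewrite | github.com/HAAIL-Universe/AgentZero | challenges/C099_graph_coloring/graph_coloring.py | register_allocate
-- ===== SOURCE A (Python) =====
-- def interval_graph_color(intervals):
--     """
--     Color intervals optimally. Each interval is (start, end).
--     Returns (coloring, num_colors) where coloring maps index -> color.
--     Uses sweep-line algorithm.
--     """
--     if not intervals:
--         return {}, 0
--
--     events = []
--     for i, (s, e) in enumerate(intervals):
--         events.append((s, 0, i))   # 0 = start
--         events.append((e, 1, i))   # 1 = end
--     events.sort()
--
--     coloring = {}
--     available = []  # min-heap of freed colors
--     next_color = 0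
--
--     import heapq
--     for _, etype, idx in events:
--         if etype == 0:  # interval starts
--             if available:
--                 c = heapq.heappop(available)
--             else:
--                 c = next_color
--                 next_color += 1
--             coloring[idx] = c
--         else:  # interval ends
--             heapq.heappush(available, coloring[idx])
--
--     return coloring, next_color
--
-- def register_allocate(live_ranges):
--     """
--     Allocate registers given live ranges of variables.
--     live_ranges: dict mapping var_name -> (start, end)
--     Returns (allocation, num_registers) mapping var_name -> register_id.
--     """
--     if not live_ranges:
--         return {}, 0
--
--     names = list(live_ranges.keys())
--     intervals = [live_ranges[n] for n in names]
--     coloring, num_colors = interval_graph_color(intervals)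
--
--     allocation = {names[i]: coloring[i] for i in range(len(names))}
--     return allocation, num_colors
-- ===== SOURCE B (Python) =====
-- def register_allocate(live_ranges):
--     """Sweep-line register allocation without a heap: keep the set of colors in
--     use ("live"); a start event takes the smallest non-negative color not in the
--     set, an end event puts its interval's color back by removing it from the set."""
--     if not live_ranges:
--         return {}, 0
--
--     names = list(live_ranges.keys())
--     events = []
--     for i, (s, e) in enumerate(live_ranges.values()):
--         events.append((s, 0, i))
--         events.append((e, 1, i))
--     events.sort()
--
--     color = {}
--     live = set()
--     num = 0
--     for _, etype, idx in events:
--         if etype == 0: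
--             c = 0
--             while c in live:
--                 c += 1
--             live.add(c)
--             color[idx] = c
--             num = max(num, c + 1)
--         else:
--             live.discard(color[idx])
--
--     return {n: color[i] for i, n in enumerate(names)}, num
-- ===== Notes on version B (the rewrite author's own statement) =====
-- stated objective: simpler
-- what changed: The min-heap of freed colors and the next_color counter are replaced by a set of currently-live colors: a start event takes the smallest non-negative integer not in the set (scan from 0), an end event removes the interval's color, and the register count is a running max of c+1.
import Mathlib
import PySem

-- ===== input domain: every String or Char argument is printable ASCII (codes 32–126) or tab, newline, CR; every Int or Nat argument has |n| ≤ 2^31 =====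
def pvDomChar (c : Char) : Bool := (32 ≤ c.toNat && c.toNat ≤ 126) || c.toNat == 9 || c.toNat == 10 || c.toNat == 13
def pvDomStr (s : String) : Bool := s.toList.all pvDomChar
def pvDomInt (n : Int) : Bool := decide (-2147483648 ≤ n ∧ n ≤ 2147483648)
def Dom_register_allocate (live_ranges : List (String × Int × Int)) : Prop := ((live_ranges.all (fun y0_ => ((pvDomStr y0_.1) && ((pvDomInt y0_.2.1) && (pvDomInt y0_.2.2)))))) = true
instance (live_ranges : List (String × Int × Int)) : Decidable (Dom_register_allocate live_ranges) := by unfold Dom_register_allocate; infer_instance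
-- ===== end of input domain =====

-- B replaces A's min-heap of freed colors (plus next_color counter) by a set of
-- currently-live colors with a scan-from-0 smallest-free-color search: simpler state.

-- ===== PORT A =====
-- lexicographic sort key of a Python event triple (coord, etype, idx); events.sort()
-- compares tuples lexicographically, which is exactly the Lex order used here
def evKey (e : Int × Int × Int) : Lex (Int × Lex (Int × Int)) := toLex (e.1, toLex (e.2.1, e.2.2))

-- heapq modelled by a sorted list: heappush is ordered insert, heappop takes the
-- head — exact for the value sequence A observes (heappop always yields the minimum)
def heapPush (h : List Int) (c : Int) : List Int :=
  match h with
  | [] => [c]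
  | x :: t => if c < x then c :: x :: t else x :: heapPush t c

-- one iteration of A's event loop; state = (coloring, available, next_color).
-- On an end event Python reads coloring[idx] (KeyError when absent — excluded by
-- Pre_); getD 0 stands in for the raising lookup outside Pre_.
def icgStep (st : PySem.Dict Int Int × List Int × Int) (ev : Int × Int × Int) :
    PySem.Dict Int Int × List Int × Int :=
  if ev.2.1 = 0 then
    match st.2.1 with
    | c :: rest => (st.1.insert ev.2.2 c, rest, st.2.2)
    | [] => (st.1.insert ev.2.2 st.2.2, [], st.2.2 + 1)
  else
    (st.1, heapPush st.2.1 (st.1.getD ev.2.2 0), st.2.2)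

def interval_graph_color (intervals : List (Int × Int)) : PySem.Dict Int Int × Int :=
  if intervals = [] then (PySem.Dict.empty, 0) else
  let events := (PySem.List.enumerate intervals).foldl
      (fun acc p => acc ++ [(p.2.1, (0 : Int), p.1), (p.2.2, (1 : Int), p.1)]) []
  let events := PySem.List.sorted events evKey false
  let res := events.foldl icgStep (PySem.Dict.empty, [], 0)
  (res.1, res.2.2)

def register_allocate (live_ranges : List (String × Int × Int)) : (List (String × Int)) × Int :=
  let d : PySem.Dict String (Int × Int) := PySem.Dict.ofList live_ranges
  if live_ranges = [] then ([], 0) else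
  let names := d.keys
  let intervals := names.map (fun n => d.getD n (0, 0))
  let res := interval_graph_color intervals
  let allocation := (PySem.List.pyRange 0 (PySem.List.len names) 1).foldl
      (fun a i => a.insert (PySem.List.pyGetD names i "") (res.1.getD i 0)) PySem.Dict.empty
  (allocation.items, res.2)

-- ===== PORT B =====
-- Source B's 'c = 0; while c in live: c += 1'. fuel = live.length + 1 always suffices:
-- the ≤ live.length + 1 candidates 0..live.length are distinct, live has live.length
-- members, so a free candidate is hit before the fuel runs out — the loop is exact.
def mexAux (live : PySem.Set Int) : Nat → Int → Int
  | 0, c => c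
  | fuel + 1, c => if c ∈ live then mexAux live fuel (c + 1) else c

-- one iteration of B's event loop; state = (color, live, num).
-- On an end event Source B reads color[idx] (KeyError when absent — excluded by Pre_).
def altStep (st : PySem.Dict Int Int × PySem.Set Int × Int) (ev : Int × Int × Int) :
    PySem.Dict Int Int × PySem.Set Int × Int :=
  if ev.2.1 = 0 then
    let c := mexAux st.2.1 (st.2.1.length + 1) 0
    (st.1.insert ev.2.2 c, PySem.Set.add st.2.1 c, max st.2.2 (c + 1))
  else
    (st.1, PySem.Set.discard st.2.1 (st.1.getD ev.2.2 0), st.2.2)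

def register_allocate_alt (live_ranges : List (String × Int × Int)) : (List (String × Int)) × Int :=
  let d : PySem.Dict String (Int × Int) := PySem.Dict.ofList live_ranges
  if live_ranges = [] then ([], 0) else
  let names := d.keys
  let events := (PySem.List.enumerate d.values).foldl
      (fun acc p => acc ++ [(p.2.1, (0 : Int), p.1), (p.2.2, (1 : Int), p.1)]) []
  let events := PySem.List.sorted events evKey false
  let res := events.foldl altStep (PySem.Dict.empty, PySem.Set.empty, 0)
  let allocation := (PySem.List.enumerate names).foldl
      (fun a p => a.insert p.2 (res.1.getD p.1 0)) PySem.Dict.empty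
  (allocation.items, res.2.2)

-- ===== PRECONDITION & SPEC =====
-- Pre_ excludes exactly the inputs on which the Python A raises KeyError: a variable
-- whose (effective, last-binding) live range has start > end ends before it starts,
-- so coloring[idx] is read before it is written; B raises there too.
def Pre_register_allocate (live_ranges : List (String × Int × Int)) : Prop :=
  ∀ p ∈ (PySem.Dict.ofList live_ranges : PySem.Dict String (Int × Int)).values, p.1 ≤ p.2
instance (live_ranges : List (String × Int × Int)) : Decidable (Pre_register_allocate live_ranges) := by unfold Pre_register_allocate; infer_instance

def pvWitness_register_allocate : (List (String × Int × Int)) := [("a", 0, 5), ("b", 3, 7), ("c", 6, 6)]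

def Spec_register_allocate (live_ranges : List (String × Int × Int)) (out : (List (String × Int)) × Int) : Prop := out = register_allocate_alt live_ranges
instance (live_ranges : List (String × Int × Int)) (out : (List (String × Int)) × Int) : Decidable (Spec_register_allocate live_ranges out) := by unfold Spec_register_allocate; infer_instance

-- ===== CLAIM (what is proved, stated in full; the proofs are below) =====
def Claim_equal_register_allocate : Prop := ∀ (live_ranges : List (String × Int × Int)), Dom_register_allocate live_ranges → Pre_register_allocate live_ranges → Spec_register_allocate live_ranges (register_allocate live_ranges)

-- ===== LEMMAS AND PROOFS =====

lemma evKey_inj : Function.Injective evKey := by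
  intro a b h
  have h' := toLex.injective h
  have h1 : a.1 = b.1 := congrArg Prod.fst h'
  have h2 := toLex.injective (congrArg Prod.snd h')
  exact Prod.ext h1 (Prod.ext (congrArg Prod.fst h2) (congrArg Prod.snd h2))

lemma evKey_start_lt_end (s e i : Int) (h : s ≤ e) : evKey (s,0,i) < evKey (e,1,i) := by
  simp only [evKey, Prod.Lex.toLex_lt_toLex]
  rcases lt_or_eq_of_le h with h | h
  · exact Or.inl h
  · exact Or.inr ⟨h, by simp⟩

lemma mem_heapPush (h : List Int) (c x : Int) : x ∈ heapPush h c ↔ x = c ∨ x ∈ h := by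
  induction h with
  | nil => simp [heapPush]
  | cons y t ih =>
    simp only [heapPush]
    split_ifs
    · simp [List.mem_cons]
    · simp [List.mem_cons, ih]; tauto

lemma heapPush_pairwise (h : List Int) (c : Int) (hp : h.Pairwise (· < ·)) (hc : c ∉ h) :
    (heapPush h c).Pairwise (· < ·) := by
  induction h with
  | nil => simp [heapPush]
  | cons y t ih =>
    rw [List.pairwise_cons] at hp
    simp only [heapPush]
    split_ifs with hcy
    · exact List.pairwise_cons.mpr ⟨by
        intro z hz
        rcases List.mem_cons.mp hz with rfl | hz'
        · exact hcy
        · exact lt_trans hcy (hp.1 z hz'), List.pairwise_cons.mpr hp⟩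
    · have hcy' : c ≠ y := fun h => hc (h ▸ List.mem_cons_self ..)
      have hyc : y < c := by omega
      refine List.pairwise_cons.mpr ⟨?_, ih hp.2 (fun hm => hc (List.mem_cons_of_mem _ hm))⟩
      intro z hz
      rcases (mem_heapPush t c z).mp hz with rfl | hz'
      · exact hyc
      · exact hp.1 z hz'

lemma mexAux_eq (live : List Int) (m : Int) (hm : m ∉ live)
    (hfill : ∀ x : Int, 0 ≤ x → x < m → x ∈ live) :
    ∀ (fuel : Nat) (c : Int), 0 ≤ c → c ≤ m → m < c + fuel → mexAux live fuel c = m := by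
  intro fuel
  induction fuel with
  | zero => intro c _ h1 h2; simp at h2; omega
  | succ f ih =>
    intro c hc0 hcm hlt
    by_cases hc : c ∈ live
    · have hne : c ≠ m := fun h => hm (h ▸ hc)
      simp only [mexAux, if_pos hc]
      exact ih (c + 1) (by omega) (by omega) (by push_cast at hlt ⊢; omega)
    · have : c = m := by
        rcases lt_or_eq_of_le hcm with h | h
        · exact absurd (hfill c hc0 h) hc
        · exact h
      subst this
      simp only [mexAux, if_neg hc]

lemma int_card_le (live : List Int) (m : Int) (h0 : 0 ≤ m)
    (hsub : ∀ x : Int, 0 ≤ x → x < m → x ∈ live) : m ≤ live.length := by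
  have hL : ((List.range m.toNat).map (fun k : Nat => (k : Int))).Subperm live := by
    refine List.Nodup.subperm ?_ ?_
    · exact (List.nodup_range).map (fun a b h => by omega)
    · intro x hx
      obtain ⟨k, hk, rfl⟩ := List.mem_map.mp hx
      exact hsub _ (by omega) (by rw [List.mem_range] at hk; omega)
  have := hL.length_le
  simp only [List.length_map, List.length_range] at this
  omega

def WF : List (Int × Int × Int) → List Int → Prop
  | [], _ => True
  | ev :: E, O =>
      if ev.2.1 = 0 then ev.2.2 ∉ O ∧ WF E (ev.2.2 :: O)
      else ev.2.2 ∈ O ∧ WF E (O.erase ev.2.2)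

def StInv (live avail : List Int) (next : Int) : Prop :=
  avail.Pairwise (· < ·) ∧ live.Nodup ∧ 0 ≤ next ∧
  (∀ c : Int, c ∈ avail ↔ (0 ≤ c ∧ c < next ∧ c ∉ live)) ∧
  (∀ c ∈ live, 0 ≤ c ∧ c < next)

def OpenInv (O : List Int) (col : PySem.Dict Int Int) (live : List Int) : Prop :=
  O.Nodup ∧ (∀ c : Int, c ∈ live ↔ ∃ i ∈ O, col.getD i 0 = c) ∧
  (∀ i ∈ O, ∀ j ∈ O, col.getD i 0 = col.getD j 0 → i = j)

lemma set_add_of_not_mem (s : PySem.Set Int) (x : Int) (h : x ∉ s) :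
    PySem.Set.add s x = s ++ [x] := by
  simp only [PySem.Set.add]
  rw [if_neg]
  intro hc
  exact h (by simpa [PySem.Set.contains] using hc)

lemma OpenInv_insert (O : List Int) (col : PySem.Dict Int Int) (live : List Int) (i0 c0 : Int)
    (h : OpenInv O col live) (hiO : i0 ∉ O) (hc0 : c0 ∉ live) :
    OpenInv (i0 :: O) (col.insert i0 c0) (live ++ [c0]) := by
  obtain ⟨hOnd, hlive, hinj⟩ := h
  have hgc : ∀ i ∈ O, (col.insert i0 c0).getD i 0 = col.getD i 0 := by
    intro i hi
    have hne : i ≠ i0 := fun he => hiO (he ▸ hi)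
    rw [PySem.Dict.getD_insert, if_neg hne]
  refine ⟨List.nodup_cons.mpr ⟨hiO, hOnd⟩, ?_, ?_⟩
  · intro c
    constructor
    · intro hc
      rcases List.mem_append.mp hc with h | h
      · obtain ⟨i, hi, hci⟩ := (hlive c).mp h
        exact ⟨i, List.mem_cons_of_mem _ hi, by rw [hgc i hi]; exact hci⟩
      · refine ⟨i0, List.mem_cons_self .., ?_⟩
        rw [PySem.Dict.getD_insert_self]
        rw [List.mem_singleton] at h
        exact h.symm
    · rintro ⟨i, hi, hci⟩
      rcases List.mem_cons.mp hi with rfl | hi'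
      · rw [PySem.Dict.getD_insert_self] at hci
        simp [← hci]
      · rw [hgc i hi'] at hci
        exact List.mem_append_left _ ((hlive c).mpr ⟨i, hi', hci⟩)
  · intro i hi j hj hij
    rcases List.mem_cons.mp hi with rfl | hi' <;> rcases List.mem_cons.mp hj with rfl | hj'
    · rfl
    · rw [PySem.Dict.getD_insert_self, hgc j hj'] at hij
      exact absurd ((hlive _).mpr ⟨j, hj', hij.symm⟩) hc0
    · rw [PySem.Dict.getD_insert_self, hgc i hi'] at hij
      exact absurd ((hlive _).mpr ⟨i, hi', hij⟩) hc0
    · rw [hgc i hi', hgc j hj'] at hij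
      exact hinj i hi' j hj' hij

lemma fold_eq : ∀ (E : List (Int × Int × Int)) (O : List Int) (col : PySem.Dict Int Int)
    (avail live : List Int) (next : Int),
    WF E O → StInv live avail next → OpenInv O col live →
    (E.foldl icgStep (col, avail, next)).1 = (E.foldl altStep (col, live, next)).1 ∧
    (E.foldl icgStep (col, avail, next)).2.2 = (E.foldl altStep (col, live, next)).2.2 := by
  intro E
  induction E with
  | nil => intro O col avail live next _ _ _; exact ⟨rfl, rfl⟩
  | cons ev E ih =>
    intro O col avail live next hwf hinv hopen
    obtain ⟨hpw, hnd, hnext0, hav, hlb⟩ := hinv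
    obtain ⟨hOnd, hlive, hinj⟩ := hopen
    simp only [List.foldl_cons]
    by_cases ht : ev.2.1 = 0
    · -- start event
      rw [WF, if_pos ht] at hwf
      obtain ⟨hiO, hwf'⟩ := hwf
      have hmex : ∀ (m : Int), m ∉ live → (∀ x : Int, 0 ≤ x → x < m → x ∈ live) → 0 ≤ m →
          mexAux live (live.length + 1) 0 = m := by
        intro m hm hf h0
        exact mexAux_eq live m hm hf (live.length + 1) 0 le_rfl h0
          (by have := int_card_le live m h0 hf; push_cast; omega)
      rcases havnil : avail with _ | ⟨a, rest⟩
      · -- avail = []: both pick next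
        have hnl : next ∉ live := fun h => by have := hlb next h; omega
        have hc : mexAux live (live.length + 1) 0 = next := by
          refine hmex next hnl ?_ hnext0
          intro x hx0 hxm
          by_contra hxl
          have := (hav x).mpr ⟨hx0, hxm, hxl⟩
          simp [havnil] at this
        simp only [icgStep, altStep, if_pos ht, hc]
        have hmax : max next (next + 1) = next + 1 := by omega
        rw [hmax, set_add_of_not_mem live next hnl]
        refine ih (ev.2.2 :: O) (col.insert ev.2.2 next) [] (live ++ [next]) (next + 1) hwf' ?_
          (OpenInv_insert O col live ev.2.2 next ⟨hOnd, hlive, hinj⟩ hiO hnl)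
        refine ⟨List.Pairwise.nil, ?_, by omega, ?_, ?_⟩
        · refine List.Nodup.append hnd (List.nodup_singleton _) ?_
          intro x hx hx2
          rw [List.mem_singleton] at hx2
          exact hnl (hx2 ▸ hx)
        · intro c
          simp only [List.mem_nil_iff, false_iff, List.mem_append, List.mem_singleton]
          rintro ⟨h1, h2, h3⟩
          rcases lt_or_eq_of_le (by omega : c ≤ next) with h | h
          · have := (hav c).mpr ⟨h1, h, fun hh => h3 (Or.inl hh)⟩
            simp [havnil] at this
          · exact h3 (Or.inr h)
        · intro c hc
          rcases List.mem_append.mp hc with h | h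
          · have := hlb c h; omega
          · simp at h; omega
      · -- avail = a :: rest: both pick a
        have ha := (hav a).mp (havnil ▸ List.mem_cons_self ..)
        have hpw' := List.pairwise_cons.mp (havnil ▸ hpw)
        have hc : mexAux live (live.length + 1) 0 = a := by
          refine hmex a ha.2.2 ?_ ha.1
          intro x hx0 hxa
          by_contra hxl
          have hmem := (hav x).mpr ⟨hx0, by omega, hxl⟩
          rw [havnil] at hmem
          rcases List.mem_cons.mp hmem with rfl | hm
          · omega
          · have := hpw'.1 x hm; omega
        simp only [icgStep, altStep, if_pos ht, hc]
        have hmax : max next (a + 1) = next := by omega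
        rw [hmax, set_add_of_not_mem live a ha.2.2]
        refine ih (ev.2.2 :: O) (col.insert ev.2.2 a) rest (live ++ [a]) next hwf' ?_
          (OpenInv_insert O col live ev.2.2 a ⟨hOnd, hlive, hinj⟩ hiO ha.2.2)
        refine ⟨hpw'.2, ?_, hnext0, ?_, ?_⟩
        · refine List.Nodup.append hnd (List.nodup_singleton _) ?_
          intro x hx hx2
          rw [List.mem_singleton] at hx2
          exact ha.2.2 (hx2 ▸ hx)
        · intro c
          constructor
          · intro hc'
            have hca : a < c := hpw'.1 c hc'
            have := (hav c).mp (havnil ▸ List.mem_cons_of_mem _ hc')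
            refine ⟨this.1, this.2.1, ?_⟩
            simp only [List.mem_append, List.mem_singleton]
            rintro (h | h)
            · exact this.2.2 h
            · omega
          · rintro ⟨h1, h2, h3⟩
            simp only [List.mem_append, List.mem_singleton, not_or] at h3
            have := (hav c).mpr ⟨h1, h2, h3.1⟩
            rw [havnil] at this
            rcases List.mem_cons.mp this with rfl | hm
            · exact absurd rfl h3.2
            · exact hm
        · intro c hc'
          rcases List.mem_append.mp hc' with h | h
          · exact hlb c h
          · simp at h; omega
    · -- end event
      rw [WF, if_neg ht] at hwf
      obtain ⟨hiO, hwf'⟩ := hwf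
      set c := col.getD ev.2.2 0 with hcdef
      have hcl : c ∈ live := (hlive c).mpr ⟨ev.2.2, hiO, rfl⟩
      have hdis : PySem.Set.discard live c = live.filter (fun y => ¬ y = c) := by
        unfold PySem.Set.discard
        congr 1
        funext y
        by_cases h : y = c <;> simp [h]
      simp only [icgStep, altStep, if_neg ht, ← hcdef, hdis]
      refine ih (O.erase ev.2.2) col (heapPush avail c) (live.filter (fun y => ¬ y = c)) next hwf' ?_ ?_
      · have hcavail : c ∉ avail := fun h => ((hav c).mp h).2.2 hcl
        refine ⟨heapPush_pairwise avail c hpw hcavail, hnd.filter _, hnext0, ?_, ?_⟩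
        · intro x
          rw [mem_heapPush]
          constructor
          · rintro (rfl | h)
            · refine ⟨(hlb c hcl).1, (hlb c hcl).2, ?_⟩
              intro hm
              have := (List.mem_filter.mp hm).2
              simp at this
            · have := (hav x).mp h
              refine ⟨this.1, this.2.1, ?_⟩
              intro hm
              exact this.2.2 (List.mem_filter.mp hm).1
          · rintro ⟨h1, h2, h3⟩
            by_cases hx : x = c
            · exact Or.inl hx
            · refine Or.inr ((hav x).mpr ⟨h1, h2, ?_⟩)
              intro hm
              refine h3 (List.mem_filter.mpr ⟨hm, ?_⟩)
              simpa using hx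
        · intro x hx
          exact hlb x (List.mem_filter.mp hx).1
      · refine ⟨hOnd.erase _, ?_, ?_⟩
        · intro x
          constructor
          · intro hx
            have hx' := List.mem_filter.mp hx
            have hxc : x ≠ c := by simpa using hx'.2
            obtain ⟨i, hi, hci⟩ := (hlive x).mp hx'.1
            have hine : i ≠ ev.2.2 := fun he => hxc (by rw [← hci, he])
            exact ⟨i, (List.Nodup.mem_erase_iff hOnd).mpr ⟨hine, hi⟩, hci⟩
          · rintro ⟨i, hi, hci⟩
            obtain ⟨hine, hi'⟩ := (List.Nodup.mem_erase_iff hOnd).mp hi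
            refine List.mem_filter.mpr ⟨(hlive x).mpr ⟨i, hi', hci⟩, ?_⟩
            simp only [decide_not, Bool.not_eq_eq_eq_not, Bool.not_true, decide_eq_false_iff_not]
            intro hxc
            exact hine (hinj i hi' ev.2.2 hiO (by rw [hci, hxc]))
        · intro i hi j hj hij
          exact hinj i ((List.Nodup.mem_erase_iff hOnd).mp hi).2
            j ((List.Nodup.mem_erase_iff hOnd).mp hj).2 hij

lemma map_fst_erase (O : List (Int × Int)) (r : Int × Int) :
    ∀ (_ : r ∈ O) (_ : (O.map (·.1)).Nodup),
    (O.erase r).map (·.1) = (O.map (·.1)).erase r.1 := by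
  induction O with
  | nil => intro hr' _; simp at hr'
  | cons o t ih =>
    intro hr hnd
    by_cases ho : o = r
    · subst ho
      simp [List.erase_cons_head]
    · have hro : r ∈ t := by
        rcases List.mem_cons.mp hr with h | h
        · exact absurd h.symm ho
        · exact h
      have hfst : o.1 ≠ r.1 := by
        intro he
        have : r.1 ∈ t.map (·.1) := List.mem_map.mpr ⟨r, hro, rfl⟩
        exact (List.nodup_cons.mp hnd).1 (by show o.1 ∈ t.map (·.1); rw [he]; exact this)
      rw [List.erase_cons_tail (by simpa using (fun h : o = r => ho h)),
        List.map_cons, List.map_cons, List.erase_cons_tail (by simpa using hfst),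
        ih hro (List.nodup_cons.mp hnd).2]

lemma mem_flatMap_idx (P : List (Int × Int × Int)) (ev : Int × Int × Int)
    (h : ev ∈ P.flatMap (fun q => [(q.2.1, (0:Int), q.1), (q.2.2, (1:Int), q.1)])) :
    ev.2.2 ∈ P.map (·.1) := by
  obtain ⟨q, hq, hev⟩ := List.mem_flatMap.mp h
  rw [List.mem_cons, List.mem_singleton] at hev
  rcases hev with h | h
  · exact List.mem_map.mpr ⟨q, hq, by rw [h]⟩
  · exact List.mem_map.mpr ⟨q, hq, by rw [h]⟩

lemma events_nodup (P : List (Int × Int × Int)) :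
    ∀ (_ : (P.map (·.1)).Nodup),
    (P.flatMap (fun q => [(q.2.1, (0:Int), q.1), (q.2.2, (1:Int), q.1)])).Nodup := by
  induction P with
  | nil => intro _; simp
  | cons q t ih =>
    intro hnd
    rw [List.map_cons, List.nodup_cons] at hnd
    rw [List.flatMap_cons]
    refine List.Nodup.append ?_ (ih hnd.2) ?_
    · rw [List.nodup_cons]
      refine ⟨?_, List.nodup_singleton _⟩
      rw [List.mem_singleton]
      intro h
      have := congrArg (·.2.1) h
      simp at this
    · intro ev hev hev'
      have := mem_flatMap_idx t ev hev'
      rw [List.mem_cons, List.mem_singleton] at hev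
      have hq1 : ev.2.2 = q.1 := by
        rcases hev with h | h
        · rw [h]
        · rw [h]
      exact hnd.1 (hq1 ▸ this)

lemma sorted_strict (events : List (Int × Int × Int)) (hnd : events.Nodup) :
    (PySem.List.sorted events evKey false).Pairwise (fun a b => evKey a < evKey b) := by
  have hperm := PySem.List.sorted_perm events evKey false
  have hnd' : (PySem.List.sorted events evKey false).Nodup := hperm.nodup_iff.mpr hnd
  have hle := PySem.List.sorted_pairwise events evKey
  have := List.Pairwise.and hle hnd'
  refine this.imp ?_
  rintro a b ⟨h1, h2⟩
  exact lt_of_le_of_ne h1 (fun he => h2 (evKey_inj he))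

lemma wf_sorted : ∀ (S P : List (Int × Int × Int)) (O : List (Int × Int)),
    S.Pairwise (fun a b => evKey a < evKey b) →
    S.Perm (P.flatMap (fun q => [(q.2.1, (0:Int), q.1), (q.2.2, (1:Int), q.1)])
      ++ O.map (fun r => (r.2, (1:Int), r.1))) →
    (∀ q ∈ P, q.2.1 ≤ q.2.2) →
    ((P.map (·.1)) ++ O.map (·.1)).Nodup →
    WF S (O.map (·.1)) := by
  intro S
  induction S with
  | nil => intro P O _ _ _ _; trivial
  | cons ev S ih =>
    intro P O hpw hperm hse hnd
    have hmem : ev ∈ _ := hperm.mem_iff.mp (List.mem_cons_self ..)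
    have hpw' := List.pairwise_cons.mp hpw
    rcases List.mem_append.mp hmem with hf | ho
    · -- ev comes from a pending interval q
      obtain ⟨q, hq, hev⟩ := List.mem_flatMap.mp hf
      rw [List.mem_cons, List.mem_singleton] at hev
      have hcase : ev = (q.2.1, (0:Int), q.1) := by
        rcases hev with h | h
        · exact h
        · -- ev is q's end event: q's start event would have a smaller key yet come later
          exfalso
          have hst : (q.2.1, (0:Int), q.1) ∈ ev :: S := by
            refine hperm.mem_iff.mpr (List.mem_append_left _ ?_)
            exact List.mem_flatMap.mpr ⟨q, hq, by simp⟩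
          have hne : (q.2.1, (0:Int), q.1) ≠ ev := by
            rw [h]; intro hcon
            have := congrArg (·.2.1) hcon
            simp at this
          have hstS : (q.2.1, (0:Int), q.1) ∈ S := by
            rcases List.mem_cons.mp hst with hh | hh
            · exact absurd hh hne
            · exact hh
          have hlt1 := hpw'.1 _ hstS
          have hlt2 : evKey (q.2.1, (0:Int), q.1) < evKey ev := h ▸ evKey_start_lt_end _ _ _ (hse q hq)
          exact lt_asymm hlt1 hlt2
      -- WF start step
      have hiO : q.1 ∉ O.map (·.1) :=
        fun hin => (List.disjoint_of_nodup_append hnd) (List.mem_map.mpr ⟨q, hq, rfl⟩) hin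
      rw [hcase, WF, if_pos rfl]
      refine ⟨hiO, ?_⟩
      have hres := ih (P.erase q) ((q.1, q.2.2) :: O) ?_ ?_ ?_ ?_
      · simpa using hres
      · exact hpw'.2
      · -- permutation bookkeeping
        have hP : P.Perm (q :: P.erase q) := List.perm_cons_erase hq
        have h1 : (P.flatMap (fun q => [(q.2.1, (0:Int), q.1), (q.2.2, (1:Int), q.1)])).Perm
            ((q.2.1, (0:Int), q.1) :: (q.2.2, (1:Int), q.1) ::
              (P.erase q).flatMap (fun q => [(q.2.1, (0:Int), q.1), (q.2.2, (1:Int), q.1)])) := by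
          have := List.Perm.flatMap (f := fun q => [(q.2.1, (0:Int), q.1), (q.2.2, (1:Int), q.1)])
            (g := fun q => [(q.2.1, (0:Int), q.1), (q.2.2, (1:Int), q.1)]) hP
            (fun a _ => List.Perm.refl _)
          simpa using this
        have h2 := hperm.trans (h1.append_right _)
        have h3 := (hcase ▸ h2).cons_inv
        refine h3.trans ?_
        simp only [List.map_cons]
        exact List.perm_middle.symm
      · intro q' hq'
        exact hse q' ((List.erase_sublist ..).subset hq')
      · -- nodup bookkeeping
        have hP : (P.map (·.1)).Perm (q.1 :: (P.erase q).map (·.1)) :=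
          (List.perm_cons_erase hq).map (·.1)
        have : ((P.map (·.1)) ++ O.map (·.1)).Perm
            ((P.erase q).map (·.1) ++ ((q.1, q.2.2) :: O).map (·.1)) := by
          refine (hP.append_right _).trans ?_
          simp only [List.map_cons, List.cons_append]
          exact List.perm_middle.symm
        exact this.nodup_iff.mp hnd
    · -- ev is the end event of an open interval
      obtain ⟨r, hr, hev⟩ := List.mem_map.mp ho
      have ht : ev.2.1 = (1:Int) := by rw [← hev]
      have hiO : ev.2.2 ∈ O.map (·.1) := List.mem_map.mpr ⟨r, hr, by rw [← hev]⟩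
      rw [WF, if_neg (by omega)]
      refine ⟨hiO, ?_⟩
      have hndO : (O.map (·.1)).Nodup := (List.nodup_append.mp hnd).2.1
      have hres := ih P (O.erase r) ?_ ?_ ?_ ?_
      · rw [map_fst_erase O r hr hndO] at hres
        have : r.1 = ev.2.2 := by rw [← hev]
        rwa [this] at hres
      · exact hpw'.2
      · have hO : O.Perm (r :: O.erase r) := List.perm_cons_erase hr
        have h1 : (O.map (fun r => (r.2, (1:Int), r.1))).Perm
            ((r.2, (1:Int), r.1) :: (O.erase r).map (fun r => (r.2, (1:Int), r.1))) := by
          have := hO.map (fun r => (r.2, (1:Int), r.1))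
          simpa using this
        have h2 := hperm.trans (h1.append_left _)
        have h3 : (ev :: S).Perm (ev :: (P.flatMap (fun q => [(q.2.1, (0:Int), q.1), (q.2.2, (1:Int), q.1)])
            ++ (O.erase r).map (fun r => (r.2, (1:Int), r.1)))) := by
          refine h2.trans ?_
          rw [hev]
          exact List.perm_middle
        exact h3.cons_inv
      · exact hse
      · have hO : (O.map (·.1)).Perm (r.1 :: (O.erase r).map (·.1)) :=
          (List.perm_cons_erase hr).map (·.1)
        have : ((P.map (·.1)) ++ O.map (·.1)).Perm
            ((P.map (·.1)) ++ (r.1 :: (O.erase r).map (·.1))) := hO.append_left _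
        have hnd' := this.nodup_iff.mp hnd
        rw [map_fst_erase O r hr hndO]
        exact List.Nodup.sublist (List.Sublist.append_left List.erase_sublist _) hnd

-- ===== VERDICT (by name: the statement is the Claim_ definition above) =====
theorem register_allocate_spec : Claim_equal_register_allocate := by
  intro live_ranges _ hpre
  unfold Spec_register_allocate
  by_cases hnil : live_ranges = []
  · simp [register_allocate, register_allocate_alt, hnil]
  · simp only [register_allocate, register_allocate_alt, if_neg hnil]
    -- shared data
    have hknd : (PySem.Dict.ofList live_ranges : PySem.Dict String (Int × Int)).keys.Nodup :=
      PySem.Dict.nodup_keys_ofList live_ranges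
    set d : PySem.Dict String (Int × Int) := PySem.Dict.ofList live_ranges with hd
    have hval : d.keys.map (fun k => d.getD k (0, 0)) = d.values :=
      (PySem.Dict.values_eq_map_keys d hknd (0, 0)).symm
    have hkeys : d.keys = PySem.Set.ofList (live_ranges.map (·.1)) := by
      rw [hd]
      show (live_ranges.foldl (fun d p => d.insert p.1 p.2) PySem.Dict.empty).keys = _
      rw [PySem.Dict.keys_foldl_insert_key live_ranges (·.1) (fun _ p => p.2) PySem.Dict.empty,
        PySem.Dict.keys_empty, PySem.Set.update_nil_left]
    have hne : d.keys ≠ [] := by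
      obtain ⟨p, hp⟩ := List.exists_mem_of_ne_nil live_ranges hnil
      intro h
      have hm : p.1 ∈ d.keys := by
        rw [hkeys]
        exact (PySem.Set.mem_ofList _ _).mpr (List.mem_map_of_mem hp)
      rw [h] at hm
      simp at hm
    have hint : d.keys.map (fun k => d.getD k (0, 0)) ≠ [] := by
      rw [hval]
      intro h
      have := PySem.Dict.values_eq_map_keys d hknd (0, 0)
      rw [h] at this
      exact hne (List.map_eq_nil_iff.mp this.symm)
    rw [interval_graph_color, if_neg hint]
    -- the two ports build the same sorted event list
    rw [hval]
    set P := PySem.List.enumerate d.values with hP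
    have hPnd : (P.map (·.1)).Nodup := by
      have hpl : (P.map (·.1)).Pairwise (· < ·) :=
        List.pairwise_map.mpr (PySem.List.pairwise_lt_enumerate d.values 0)
      exact hpl.imp ne_of_lt
    have hflat : P.foldl (fun acc p => acc ++ [(p.2.1, (0 : Int), p.1), (p.2.2, (1 : Int), p.1)]) []
        = P.flatMap (fun q => [(q.2.1, (0 : Int), q.1), (q.2.2, (1 : Int), q.1)]) := by
      rw [PySem.List.foldl_append_eq_flatMap (fun q => [(q.2.1, (0 : Int), q.1), (q.2.2, (1 : Int), q.1)]) P []]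
      rfl
    rw [hflat]
    set S := PySem.List.sorted (P.flatMap (fun q => [(q.2.1, (0 : Int), q.1), (q.2.2, (1 : Int), q.1)])) evKey false with hS
    have hwf : WF S [] := by
      have hres := wf_sorted S P []
        (sorted_strict _ (events_nodup P hPnd))
        (by simpa using PySem.List.sorted_perm _ evKey false)
        ?_ (by simpa using hPnd)
      · simpa using hres
      · intro q hq
        obtain ⟨k, hk, rfl⟩ := (PySem.List.mem_enumerate_iff d.values 0 q).mp hq
        exact hpre _ (List.getElem_mem hk)
    have hmain := fold_eq S [] PySem.Dict.empty [] [] 0 hwf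
      ⟨List.Pairwise.nil, List.nodup_nil, le_refl 0,
        fun c => ⟨fun hc => by simp at hc, fun hc => by omega⟩,
        fun c hc => by simp at hc⟩
      ⟨List.nodup_nil, fun c => ⟨fun hc => by simp at hc, fun hc => by simp at hc⟩,
        fun i hi => by simp at hi⟩
    rw [Prod.mk.injEq]
    constructor
    · -- the allocation dicts agree
      rw [PySem.Dict.items_foldl_insert_fresh _ _ _ _
          (fun a _ => PySem.Dict.contains_empty _)
          (by rw [PySem.List.map_pyGetD_pyRange_zero d.keys ""]; exact hknd),
        PySem.Dict.items_foldl_insert_fresh _ _ _ _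
          (fun a _ => PySem.Dict.contains_empty _)
          (by rw [PySem.List.map_snd_enumerate d.keys 0]; exact hknd)]
      rw [hmain.1, PySem.List.enumerate_eq_map_pyRange d.keys "", List.map_map]
      rfl
    · exact hmain.2
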